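-- pv_equiv track=rewrite | github.com/oleksandrshtonda/py-reading-and-writing-files | main.py | find_special_rows
-- ===== SOURCE A (Python) =====
-- from typing import List
--
-- def find_special_rows(rows: List[str]) -> List[str]:
--     rows_with_duplicates = []
--
--     for row in rows:
--         unique_numbers = []
--
--         for number in row.split(' '):
--             if number not in unique_numbers:
--                 unique_numbers.append(number)
--             else:
--                 rows_with_duplicates.append(row)
--                 break
--
--     return rows_with_duplicates
-- ===== SOURCE B (Python) =====
-- def find_special_rows(rows):
--     result = []
--     for row in rows:
--         numbers = row.split(' ')
--         if len(numbers) != len(set(numbers)):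
--             result.append(row)
--     return result
-- ===== Notes on version B (the rewrite author's own statement) =====
-- stated objective: simpler
-- what changed: Replaces A's incremental per-token scan with an inner membership loop, append and break by a single per-row size comparison len(numbers) != len(set(numbers)), appending rows in one pass with no inner loop.
import Mathlib
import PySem

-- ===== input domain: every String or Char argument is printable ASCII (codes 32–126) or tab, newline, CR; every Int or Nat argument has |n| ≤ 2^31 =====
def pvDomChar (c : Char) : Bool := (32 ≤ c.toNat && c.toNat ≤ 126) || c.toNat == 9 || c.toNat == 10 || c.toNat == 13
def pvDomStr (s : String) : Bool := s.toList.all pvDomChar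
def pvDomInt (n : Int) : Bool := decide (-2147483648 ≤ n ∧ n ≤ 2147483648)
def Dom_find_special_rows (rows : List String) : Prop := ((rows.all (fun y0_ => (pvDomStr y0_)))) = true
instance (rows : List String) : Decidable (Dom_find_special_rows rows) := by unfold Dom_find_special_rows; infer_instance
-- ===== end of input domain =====

-- B replaces A's inner membership loop with break by a per-row size comparison
-- len(numbers) != len(set(numbers)); one pass over the rows, simpler.


-- row.split(' '), shared Python primitive ported via PySem.Chars.splitOn (exact for the nonempty separator " ")
def pvSplitSp (row : String) : List String :=
  (PySem.Chars.splitOn row.toList [' ']).map String.ofList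

-- ===== PORT A =====
-- inner 'for number in …' loop: uniq = unique_numbers; appends row and breaks on first repeat
def pvInnerA (row : String) (acc : List String) : List String → List String → List String
  | _, [] => acc
  | uniq, n :: rest =>
    if uniq.contains n = false then pvInnerA row acc (uniq ++ [n]) rest
    else acc ++ [row]

def find_special_rows (rows : List String) : List String :=
  rows.foldl (fun acc row => pvInnerA row acc [] (pvSplitSp row)) []

-- ===== PORT B =====
def find_special_rows_alt (rows : List String) : List String :=
  rows.foldl (fun res row =>
    let numbers := pvSplitSp row
    if PySem.List.len numbers ≠ PySem.Set.len (PySem.Set.ofList numbers) then res ++ [row]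
    else res) []

-- ===== PRECONDITION & SPEC =====
def Spec_find_special_rows (rows : List String) (out : List String) : Prop := out = find_special_rows_alt rows
instance (rows : List String) (out : List String) : Decidable (Spec_find_special_rows rows out) := by unfold Spec_find_special_rows; infer_instance

-- ===== CLAIM (what is proved, stated in full; the proofs are below) =====
def Claim_equal_find_special_rows : Prop := ∀ (rows : List String), Dom_find_special_rows rows → Spec_find_special_rows rows (find_special_rows rows)

-- ===== LEMMAS AND PROOFS =====

-- A's inner loop appends the row exactly when the tokens break Nodup of uniq ++ toks
theorem pvInnerA_eq (row : String) (acc : List String) :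
    ∀ (toks uniq : List String), uniq.Nodup →
      pvInnerA row acc uniq toks = if (uniq ++ toks).Nodup then acc else acc ++ [row] := by
  intro toks
  induction toks with
  | nil => intro uniq h; simp [pvInnerA, h]
  | cons n rest ih =>
    intro uniq h
    by_cases hm : n ∈ uniq
    · have hnot : ¬ (uniq ++ n :: rest).Nodup := by
        intro hnd
        exact (List.disjoint_of_nodup_append hnd) hm List.mem_cons_self
      have hc : uniq.contains n = true := by simpa using hm
      simp only [pvInnerA, hc, Bool.true_eq_false, if_false, if_neg hnot]
    · have hc : uniq.contains n = false := by simpa using hm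
      have hnd : (uniq ++ [n]).Nodup := by
        simp [List.nodup_append, h]
        intro a ha he
        exact hm (he ▸ ha)
      have hrw : uniq ++ n :: rest = (uniq ++ [n]) ++ rest := by simp
      rw [hrw]
      simp only [pvInnerA, hc]
      simpa using ih (uniq ++ [n]) hnd

theorem foldl_add_len_le (xs : List String) :
    ∀ (s : List String), (xs.foldl PySem.Set.add s).length ≤ s.length + xs.length := by
  induction xs with
  | nil => intro s; simp
  | cons x rest ih =>
    intro s
    have h1 : (PySem.Set.add s x).length ≤ s.length + 1 := by
      unfold PySem.Set.add; split <;> simp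
    have h2 := ih (PySem.Set.add s x)
    simp only [List.foldl_cons, List.length_cons]
    omega

theorem foldl_add_len (xs : List String) :
    ∀ (s : List String),
      ((xs.foldl PySem.Set.add s).length = s.length + xs.length ↔
        xs.Nodup ∧ ∀ y ∈ xs, y ∉ s) := by
  induction xs with
  | nil => intro s; simp
  | cons x rest ih =>
    intro s
    by_cases hm : x ∈ s
    · have hle := foldl_add_len_le rest s
      have hadd : PySem.Set.add s x = s := by
        simp [PySem.Set.add, PySem.Set.contains, hm]
      simp only [List.foldl_cons, hadd]
      constructor
      · intro h; simp only [List.length_cons] at h; omega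
      · rintro ⟨_, hall⟩; exact absurd hm (hall x List.mem_cons_self)
    · have hadd : PySem.Set.add s x = s ++ [x] := by
        simp [PySem.Set.add, PySem.Set.contains, hm]
      simp only [List.foldl_cons, hadd]
      have hih := ih (s ++ [x])
      simp only [List.length_append, List.length_cons, List.length_nil] at hih ⊢
      rw [show s.length + (rest.length + 1) = s.length + 1 + rest.length by omega, hih]
      constructor
      · rintro ⟨hnd, hall⟩
        refine ⟨List.nodup_cons.mpr ⟨fun hx => (hall x hx) (by simp), hnd⟩, fun y hy => ?_⟩
        rcases List.mem_cons.mp hy with rfl | hy'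
        · exact hm
        · intro hs; exact (hall y hy') (by simp [hs])
      · rintro ⟨hnd, hall⟩
        have hnd' := List.nodup_cons.mp hnd
        refine ⟨hnd'.2, fun y hy hmem => ?_⟩
        rcases List.mem_append.mp hmem with hs | hx
        · exact (hall y (List.mem_cons_of_mem _ hy)) hs
        · simp at hx; subst hx; exact hnd'.1 hy

theorem set_len_iff (xs : List String) :
    (PySem.Set.ofList xs).length = xs.length ↔ xs.Nodup := by
  have h := foldl_add_len xs []
  simp only [List.not_mem_nil, not_false_iff, imp_true_iff, and_true] at h
  unfold PySem.Set.ofList PySem.Set.empty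
  simpa using h

theorem row_cond (row : String) :
    (PySem.List.len (pvSplitSp row) ≠ PySem.Set.len (PySem.Set.ofList (pvSplitSp row))) ↔
      ¬ (pvSplitSp row).Nodup := by
  have hle := PySem.Set.length_ofList_le (pvSplitSp row)
  have hiff := set_len_iff (pvSplitSp row)
  unfold PySem.List.len PySem.Set.len
  constructor
  · intro hne hnd
    exact hne (by rw [hiff.mpr hnd])
  · intro hnd hne
    exact hnd (hiff.mp (by omega))

-- ===== VERDICT (by name: the statement is the Claim_ definition above) =====
theorem find_special_rows_spec : Claim_equal_find_special_rows := by
  intro rows _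
  unfold Spec_find_special_rows find_special_rows find_special_rows_alt
  have hf : (fun (acc : List String) (row : String) => pvInnerA row acc [] (pvSplitSp row)) =
      (fun (res : List String) (row : String) =>
        let numbers := pvSplitSp row
        if PySem.List.len numbers ≠ PySem.Set.len (PySem.Set.ofList numbers) then res ++ [row]
        else res) := by
    funext acc row
    rw [pvInnerA_eq row acc (pvSplitSp row) [] List.nodup_nil]
    simp only [List.nil_append]
    by_cases h : (pvSplitSp row).Nodup
    · rw [if_pos h, if_neg (by simpa using not_not.mpr h ∘ (row_cond row).mp)]
    · rw [if_neg h, if_pos ((row_cond row).mpr h)]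
  rw [hf]
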